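-- pv_equiv track=rewrite | github.com/StefanPetkov10/Python-Exercise | Seminar exercise/4.2/ex3.py | count_it
-- ===== SOURCE A (Python) =====
-- def count_it(sequence):
--     count_dict = {}
--     for num_str in sequence:
--         num = int(num_str)
--         if (num in count_dict):
--             count_dict[num] += 1
--         else:
--             count_dict[num] = 1
--
--     sorted_counts = dict(sorted(count_dict.items()))
--     result_dict = dict(sorted_counts)
--
--     return result_dict
-- ===== SOURCE B (Python) =====
-- def count_it(sequence):
--     nums = sorted(int(x) for x in sequence)
--     result = {}
--     cur = 0
--     cnt = 0
--     for n in nums: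
--         if cnt and n == cur:
--             cnt += 1
--         else:
--             if cnt:
--                 result[cur] = cnt
--             cur = n
--             cnt = 1
--     if cnt:
--         result[cur] = cnt
--     return result
-- ===== Notes on version B (the rewrite author's own statement) =====
-- stated objective: alternative
-- what changed: B sorts the parsed integers once and emits key/count pairs in a single run-length scan over the sorted list, instead of building a counting dict with membership tests and then sorting its items.
import Mathlib
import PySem

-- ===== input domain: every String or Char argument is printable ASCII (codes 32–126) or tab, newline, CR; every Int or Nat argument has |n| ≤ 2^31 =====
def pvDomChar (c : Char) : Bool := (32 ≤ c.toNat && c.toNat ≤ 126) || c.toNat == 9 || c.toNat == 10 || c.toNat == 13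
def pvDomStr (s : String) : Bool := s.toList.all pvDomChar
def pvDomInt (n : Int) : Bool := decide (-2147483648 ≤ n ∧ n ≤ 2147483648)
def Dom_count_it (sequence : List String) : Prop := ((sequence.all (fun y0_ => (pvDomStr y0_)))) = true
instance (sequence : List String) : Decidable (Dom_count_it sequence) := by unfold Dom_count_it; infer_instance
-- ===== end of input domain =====

-- B sorts the parsed integers once and emits key/count pairs in a single run-length
-- scan over the sorted list, instead of A's counting dict + sort of its items.
-- ===== PORT A =====
-- int(num_str): PySem.Int.ofStr?; Pre_ restricts to inputs where every int() succeeds,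
-- so the .getD 0 default is never the value Python would raise on.
def count_it (sequence : List String) : List (Int × Int) :=
  let countDict : PySem.Dict Int Int :=
    sequence.foldl (fun d num_str =>
      let num := (PySem.Int.ofStr? num_str).getD 0
      if d.contains num then d.modify num 0 (· + 1) else d.insert num 1)
      PySem.Dict.empty
  -- sorted(count_dict.items()): tuples with DISTINCT first components, so Python's
  -- lexicographic tuple sort coincides exactly with sorting by the key component.
  let sortedCounts : PySem.Dict Int Int :=
    PySem.Dict.ofList (PySem.List.sorted countDict.items (fun p => p.1) false)
  let resultDict : PySem.Dict Int Int := PySem.Dict.ofList sortedCounts.items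
  resultDict.items

-- ===== PORT B =====
-- the run-length loop of Source B: cur/cnt state, emitting (cur, cnt) when the value changes
def pvRuns (cur : Int) (cnt : Int) : List Int → List (Int × Int)
  | [] => [(cur, cnt)]
  | n :: t => if n = cur then pvRuns cur (cnt + 1) t else (cur, cnt) :: pvRuns n 1 t

def count_it_alt (sequence : List String) : List (Int × Int) :=
  let nums := PySem.List.sorted (sequence.map (fun x => (PySem.Int.ofStr? x).getD 0))
                (fun x => x) false
  match nums with
  | [] => []
  | n :: t => pvRuns n 1 t

-- ===== PRECONDITION & SPEC =====
-- Pre_: every element is accepted by int(); otherwise A raises ValueError (and so does B, at the same element).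
def Pre_count_it (sequence : List String) : Prop :=
  (sequence.all (fun s => (PySem.Int.ofStr? s).isSome)) = true
-- admitted elements look like "3", "-7", " 12 ", "+40", "0", "251", "19", "8", "-2", "64", "5", "1_0"
instance (sequence : List String) : Decidable (Pre_count_it sequence) := by
  unfold Pre_count_it; infer_instance
def pvWitness_count_it : List String := ["2", "1", " +2 ", "10"]

def Spec_count_it (sequence : List String) (out : List (Int × Int)) : Prop := out = count_it_alt sequence
instance (sequence : List String) (out : List (Int × Int)) : Decidable (Spec_count_it sequence out) := by unfold Spec_count_it; infer_instance

-- ===== CLAIM (what is proved, stated in full; the proofs are below) =====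
def Claim_equal_count_it : Prop := ∀ (sequence : List String), Dom_count_it sequence → Pre_count_it sequence → Spec_count_it sequence (count_it sequence)

-- ===== LEMMAS AND PROOFS =====

-- A's if-contains-then-modify-else-insert step is exactly the Counter step.
theorem pv_step_eq (d : PySem.Dict Int Int) (n : Int) :
    (if d.contains n then d.modify n 0 (· + 1) else d.insert n 1) = d.modify n 0 (· + 1) := by
  by_cases h : d.contains n = true
  · simp [h]
  · simp only [Bool.not_eq_true] at h
    simp [h, PySem.Dict.modify, PySem.Dict.getD_of_not_contains _ _ h]

theorem pv_countDict_eq (sequence : List String) :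
    sequence.foldl (fun d num_str =>
      let num := (PySem.Int.ofStr? num_str).getD 0
      if d.contains num then d.modify num 0 (· + 1) else d.insert num 1)
      PySem.Dict.empty
    = PySem.Dict.counter (sequence.map (fun x => (PySem.Int.ofStr? x).getD 0)) := by
  rw [PySem.Dict.counter, List.foldl_map]
  apply PySem.List.foldl_congr_mem
  intro d s _
  exact pv_step_eq d _

theorem pv_ofList_items (l : List (Int × Int)) (h : (l.map (·.1)).Nodup) :
    (PySem.Dict.ofList l).items = l := by
  show (List.foldl (fun d (a : Int × Int) => d.insert a.1 a.2) PySem.Dict.empty l).items = l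
  rw [PySem.Dict.items_foldl_insert_fresh l (·.1) (·.2) _
      (by intro a _; simp [PySem.Dict.contains_empty]) h]
  simp [PySem.Dict.empty]

-- membership in the run-length output of a sorted tail
theorem pv_runs_mem (t : List Int) (cur cnt : Int)
    (hs : t.Pairwise (· ≤ ·)) (hge : ∀ x ∈ t, cur ≤ x) (p : Int × Int) :
    p ∈ pvRuns cur cnt t ↔
      p = (cur, cnt + (t.count cur : Int)) ∨
      (p.1 ∈ t ∧ p.1 ≠ cur ∧ p.2 = (t.count p.1 : Int)) := by
  induction t generalizing cur cnt with
  | nil => simp [pvRuns]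
  | cons n t ih =>
    have hnt : ∀ x ∈ t, n ≤ x := fun x hx => (List.pairwise_cons.mp hs).1 x hx
    have ht : t.Pairwise (· ≤ ·) := (List.pairwise_cons.mp hs).2
    by_cases hnc : n = cur
    · subst hnc
      rw [pvRuns, if_pos rfl, ih n (cnt + 1) ht hnt]
      constructor
      · rintro (h | h)
        · left; rw [h]; simp; ring
        · right
          refine ⟨List.mem_cons_of_mem _ h.1, h.2.1, ?_⟩
          rw [h.2.2, List.count_cons_of_ne (Ne.symm h.2.1)]
      · rintro (h | h)
        · left; rw [h]; simp; ring
        · rcases h with ⟨hm, hne, hv⟩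
          right
          rcases List.mem_cons.mp hm with h1 | h1
          · exact absurd h1 hne
          · exact ⟨h1, hne, by rw [hv, List.count_cons_of_ne (Ne.symm hne)]⟩
    · have hcurn : cur < n := lt_of_le_of_ne (hge n (List.mem_cons_self)) (Ne.symm hnc)
      have hcurt : ∀ x ∈ n :: t, cur < x := by
        intro x hx
        rcases List.mem_cons.mp hx with h1 | h1
        · rw [h1]; exact hcurn
        · exact lt_of_lt_of_le hcurn (hnt x h1)
      have hcnt0 : (n :: t).count cur = 0 := by
        rw [List.count_eq_zero]
        intro hmem
        exact absurd rfl (ne_of_gt (hcurt cur hmem))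
      rw [pvRuns, if_neg hnc]
      rw [List.mem_cons, ih n 1 ht hnt]
      constructor
      · rintro (h | h | h)
        · left; rw [h, hcnt0]; simp
        · right
          refine ⟨by rw [h]; exact List.mem_cons_self, by rw [h]; exact hnc, ?_⟩
          rw [h]; simp; ring
        · rcases h with ⟨hm, hne, hv⟩
          right
          have hx : p.1 ∈ n :: t := List.mem_cons_of_mem _ hm
          refine ⟨hx, ne_of_gt (hcurt p.1 hx), ?_⟩
          rw [hv, List.count_cons_of_ne (Ne.symm hne)]
      · rintro (h | h)
        · left; rw [h, hcnt0]; simp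
        · rcases h with ⟨hm, hne, hv⟩
          rcases List.mem_cons.mp hm with h1 | h1
          · right; left
            have : p = (p.1, p.2) := rfl
            rw [this, h1, hv, h1]
            simp
            ring
          · by_cases h2 : p.1 = n
            · right; left
              have : p = (p.1, p.2) := rfl
              rw [this, h2, hv, h2]
              simp
              ring
            · right; right
              exact ⟨h1, h2, by rw [hv, List.count_cons_of_ne (Ne.symm h2)]⟩

-- keys of the run-length output are strictly increasing
theorem pv_runs_pairwise (t : List Int) (cur cnt : Int)
    (hs : t.Pairwise (· ≤ ·)) (hge : ∀ x ∈ t, cur ≤ x) :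
    (pvRuns cur cnt t).Pairwise (fun a b => a.1 < b.1) := by
  induction t generalizing cur cnt with
  | nil => simp [pvRuns]
  | cons n t ih =>
    have hnt : ∀ x ∈ t, n ≤ x := fun x hx => (List.pairwise_cons.mp hs).1 x hx
    have ht : t.Pairwise (· ≤ ·) := (List.pairwise_cons.mp hs).2
    by_cases hnc : n = cur
    · subst hnc; rw [pvRuns, if_pos rfl]; exact ih n (cnt + 1) ht hnt
    · have hcurn : cur < n := lt_of_le_of_ne (hge n (List.mem_cons_self)) (Ne.symm hnc)
      rw [pvRuns, if_neg hnc]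
      refine List.pairwise_cons.mpr ⟨?_, ih n 1 ht hnt⟩
      intro p hp
      rcases (pv_runs_mem t n 1 ht hnt p).mp hp with h | h
      · rw [h]; exact hcurn
      · exact lt_of_lt_of_le hcurn (hnt p.1 h.1)

theorem count_it_spec_aux (sequence : List String) :
    count_it sequence = count_it_alt sequence := by
  set nums := sequence.map (fun x => (PySem.Int.ofStr? x).getD 0) with hnums
  show (PySem.Dict.ofList (PySem.Dict.ofList
      (PySem.List.sorted (sequence.foldl _ PySem.Dict.empty).items (fun p => p.1) false)).items).items
    = count_it_alt sequence
  rw [pv_countDict_eq]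
  cases hsort : PySem.List.sorted nums (fun x => x) false with
  | nil =>
    have h0 : nums = [] := (PySem.List.sorted_eq_nil_iff _ _ _).mp hsort
    have hseq : sequence = [] := List.map_eq_nil_iff.mp h0
    subst hseq
    decide
  | cons m t =>
    -- facts about the sorted list s = m :: t
    have hsp : (m :: t).Pairwise (· ≤ ·) := by
      have := PySem.List.sorted_pairwise nums (fun x => x)
      rwa [hsort] at this
    have ht : t.Pairwise (· ≤ ·) := (List.pairwise_cons.mp hsp).2
    have hmt : ∀ x ∈ t, m ≤ x := (List.pairwise_cons.mp hsp).1
    have hperm : (m :: t).Perm nums := by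
      have := PySem.List.sorted_perm nums (fun x => x) false
      rwa [hsort] at this
    have hcount : ∀ k : Int, nums.count k = (m :: t).count k :=
      fun k => (hperm.count_eq k).symm
    have hmemnums : ∀ k : Int, k ∈ nums ↔ k ∈ m :: t := fun k => hperm.mem_iff.symm
    set ys := pvRuns m 1 t with hys
    -- membership characterisation of both pair lists
    have hmem_items : ∀ p : Int × Int, p ∈ (PySem.Dict.counter nums).items ↔
        (p.1 ∈ nums ∧ p.2 = (nums.count p.1 : Int)) := by
      intro p
      rw [PySem.Dict.items_counter, List.mem_map]
      constructor
      · rintro ⟨k, hk, hkp⟩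
        rw [← hkp]
        exact ⟨(PySem.Set.mem_ofList _ _).mp hk, rfl⟩
      · rintro ⟨h1, h2⟩
        exact ⟨p.1, (PySem.Set.mem_ofList _ _).mpr h1, by rw [← h2]⟩
    have hmem_ys : ∀ p : Int × Int, p ∈ ys ↔ (p.1 ∈ nums ∧ p.2 = (nums.count p.1 : Int)) := by
      intro p
      rw [hys, pv_runs_mem t m 1 ht hmt p]
      constructor
      · rintro (h | h)
        · rw [h]
          refine ⟨(hmemnums m).mpr List.mem_cons_self, ?_⟩
          rw [hcount m, List.count_cons_self]; push_cast; ring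
        · refine ⟨(hmemnums p.1).mpr (List.mem_cons_of_mem _ h.1), ?_⟩
          rw [hcount p.1, List.count_cons_of_ne (Ne.symm h.2.1), h.2.2]
      · rintro ⟨h1, h2⟩
        by_cases hpm : p.1 = m
        · left
          have : p = (p.1, p.2) := rfl
          rw [this, hpm, h2, hpm, hcount m, List.count_cons_self]
          push_cast; ring_nf
        · right
          rcases List.mem_cons.mp ((hmemnums p.1).mp h1) with h3 | h3
          · exact absurd h3 hpm
          · exact ⟨h3, hpm, by rw [h2, hcount p.1, List.count_cons_of_ne (Ne.symm hpm)]⟩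
    -- strict key order and nodup
    have hpw : ys.Pairwise (fun a b => a.1 < b.1) := pv_runs_pairwise t m 1 ht hmt
    have hnd_ys : ys.Nodup := hpw.imp (fun h => by
      intro heq; rw [heq] at h; exact lt_irrefl _ h)
    have hnd_items : (PySem.Dict.counter nums).items.Nodup := by
      have hk := PySem.Dict.nodup_keys_counter nums
      simp only [PySem.Dict.keys] at hk
      exact List.Nodup.of_map _ hk
    have hpermi : ys.Perm (PySem.Dict.counter nums).items :=
      (List.perm_ext_iff_of_nodup hnd_ys hnd_items).mpr
        (fun p => by rw [hmem_ys p, hmem_items p])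
    have hsorted_eq : PySem.List.sorted (PySem.Dict.counter nums).items (fun p => p.1) false = ys :=
      PySem.List.sorted_eq_of_perm_of_pairwise_lt _ _ _ hpermi hpw
    have hkeys_nd : (ys.map (·.1)).Nodup := by
      have hlt : (ys.map (·.1)).Pairwise (· < ·) := List.pairwise_map.mpr hpw
      exact hlt.imp ne_of_lt
    rw [hsorted_eq, pv_ofList_items ys hkeys_nd, pv_ofList_items ys hkeys_nd]
    show ys = count_it_alt sequence
    rw [count_it_alt]
    simp only [← hnums, hsort]
    exact hys

-- ===== VERDICT (by name: the statement is the Claim_ definition above) =====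
theorem count_it_spec : Claim_equal_count_it := by
  intro sequence _ _
  unfold Spec_count_it
  exact count_it_spec_aux sequence
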